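-- pv_equiv track=rewrite | github.com/woojin-an/OZ_codingSchool | 수준별학습,멘토링/0828/2798.py | find_close_sum
-- ===== SOURCE A (Python) =====
-- def find_close_sum(N, M, cards):
--     close_sum = 0
--     for i in range(N - 2):
--         for j in range(i + 1, N - 1):
--             for k in range(j + 1, N):
--                 current_sum = cards[i] + cards[j] + cards[k]
--                 if current_sum <= M and current_sum > close_sum:
--                     close_sum = current_sum
--     return close_sum
-- ===== SOURCE B (Python) =====
-- def find_close_sum(N, M, cards):
--     arr = sorted(cards[k] for k in range(N))
--     n = len(arr)
--     best = 0
--     for i in range(n - 2):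
--         t = M - arr[i]
--         lo, hi = i + 1, n - 1
--         while lo < hi:
--             s = arr[lo] + arr[hi]
--             if s <= t:
--                 if arr[i] + s > best:
--                     best = arr[i] + s
--                 lo += 1
--             else:
--                 hi -= 1
--     return best
-- ===== Notes on version B (the rewrite author's own statement) =====
-- stated objective: faster
-- what changed: Replaces the O(N^3) brute-force scan over all index triples by sorting the first N cards once and, for each fixed smallest element, finding the best admissible pair with a two-pointer sweep (O(N^2) total).
-- outside the precondition, e.g. on find_close_sum(2, 10, [1]): A returns 0, B raises IndexError
import Mathlib
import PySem

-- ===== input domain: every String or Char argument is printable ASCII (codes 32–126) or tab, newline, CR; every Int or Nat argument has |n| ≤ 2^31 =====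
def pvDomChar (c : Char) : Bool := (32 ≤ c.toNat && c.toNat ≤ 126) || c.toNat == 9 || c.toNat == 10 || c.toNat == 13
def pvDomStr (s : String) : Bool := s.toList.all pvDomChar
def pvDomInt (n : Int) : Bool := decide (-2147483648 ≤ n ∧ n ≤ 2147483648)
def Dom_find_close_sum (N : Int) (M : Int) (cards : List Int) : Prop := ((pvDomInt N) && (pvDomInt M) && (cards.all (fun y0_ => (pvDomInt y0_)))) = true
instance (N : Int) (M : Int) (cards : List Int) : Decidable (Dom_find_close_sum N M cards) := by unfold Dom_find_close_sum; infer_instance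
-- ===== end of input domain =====

-- B sorts the first N cards once and, for each fixed smallest element, finds the best
-- admissible pair with a two-pointer sweep (O(N^2)) instead of A's scan of all triples (O(N^3)).

-- ===== PORT A =====
def find_close_sum (N : Int) (M : Int) (cards : List Int) : Int :=
  (PySem.List.pyRange 0 (N - 2) 1).foldl (fun close_sum i =>
    (PySem.List.pyRange (i + 1) (N - 1) 1).foldl (fun close_sum j =>
      (PySem.List.pyRange (j + 1) N 1).foldl (fun close_sum k =>
        if PySem.List.pyGetD cards i 0 + PySem.List.pyGetD cards j 0 + PySem.List.pyGetD cards k 0 ≤ M ∧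
           PySem.List.pyGetD cards i 0 + PySem.List.pyGetD cards j 0 + PySem.List.pyGetD cards k 0 > close_sum
        then PySem.List.pyGetD cards i 0 + PySem.List.pyGetD cards j 0 + PySem.List.pyGetD cards k 0
        else close_sum) close_sum) close_sum) 0

-- ===== PORT B =====
-- the 'while lo < hi' loop of Source B; 'fuel' only bounds the iteration count (hi - lo strictly
-- decreases each step), so the computation is Source B's
def pvTwoPtr (arr : List Int) (ai t : Int) : Nat → Nat → Nat → Int → Int
  | 0, _, _, best => best
  | fuel + 1, lo, hi, best =>
    if lo < hi then
      if arr.getD lo 0 + arr.getD hi 0 ≤ t then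
        pvTwoPtr arr ai t fuel (lo + 1) hi
          (if ai + (arr.getD lo 0 + arr.getD hi 0) > best then ai + (arr.getD lo 0 + arr.getD hi 0) else best)
      else pvTwoPtr arr ai t fuel lo (hi - 1) best
    else best

def find_close_sum_alt (N : Int) (M : Int) (cards : List Int) : Int :=
  let arr := PySem.List.sorted ((PySem.List.pyRange 0 N 1).map (fun k => PySem.List.pyGetD cards k 0)) (fun x => x) false
  let n := arr.length
  (List.range (n - 2)).foldl (fun best i =>
    pvTwoPtr arr (arr.getD i 0) (M - arr.getD i 0) (n - 1) (i + 1) (n - 1) best) 0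

-- ===== PRECONDITION & SPEC =====
-- Pre_ excludes inputs where N exceeds the number of cards: there A raises IndexError for
-- N ≥ 3, and for N = 1, 2 A's empty loops return 0 while B's reading of the first N cards
-- itself raises IndexError.
def Pre_find_close_sum (N : Int) (M : Int) (cards : List Int) : Prop :=
  N ≤ (cards.length : Int) ∨ N ≤ 0
instance (N : Int) (M : Int) (cards : List Int) : Decidable (Pre_find_close_sum N M cards) := by
  unfold Pre_find_close_sum; infer_instance

def pvWitness_find_close_sum : Int × Int × List Int := (4, 10, [1, 2, 3, 4])

def Spec_find_close_sum (N : Int) (M : Int) (cards : List Int) (out : Int) : Prop := out = find_close_sum_alt N M cards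
instance (N : Int) (M : Int) (cards : List Int) (out : Int) : Decidable (Spec_find_close_sum N M cards out) := by unfold Spec_find_close_sum; infer_instance

-- ===== CLAIM (what is proved, stated in full; the proofs are below) =====
def Claim_equal_find_close_sum : Prop := ∀ (N : Int) (M : Int) (cards : List Int), Dom_find_close_sum N M cards → Pre_find_close_sum N M cards → Spec_find_close_sum N M cards (find_close_sum N M cards)

-- ===== LEMMAS AND PROOFS =====

-- the update both loops perform on the running best
def pvF (M b s : Int) : Int := if s ≤ M ∧ s > b then s else b

lemma pvF_le (M b s : Int) : b ≤ pvF M b s := by unfold pvF; split <;> omega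

lemma pvLe_foldl (M : Int) (S : List Int) (b : Int) : b ≤ S.foldl (pvF M) b := by
  induction S generalizing b with
  | nil => simp
  | cons s S ih => exact le_trans (pvF_le M b s) (ih _)

lemma pvMem_le_foldl (M : Int) (S : List Int) (b s : Int) (hs : s ∈ S) (hm : s ≤ M) :
    s ≤ S.foldl (pvF M) b := by
  induction S generalizing b with
  | nil => simp at hs
  | cons x S ih =>
    rcases List.mem_cons.1 hs with rfl | hs
    · exact le_trans (by unfold pvF; split <;> omega) (pvLe_foldl M S (pvF M b s))
    · exact ih _ hs

lemma pvFoldl_mem (M : Int) (S : List Int) (b : Int) :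
    S.foldl (pvF M) b = b ∨ (S.foldl (pvF M) b ∈ S ∧ S.foldl (pvF M) b ≤ M) := by
  induction S generalizing b with
  | nil => simp
  | cons s S ih =>
    rcases ih (pvF M b s) with h | h
    · simp only [List.foldl_cons, h]
      unfold pvF; split
      · exact Or.inr ⟨List.mem_cons_self, by omega⟩
      · exact Or.inl rfl
    · exact Or.inr ⟨List.mem_cons_of_mem _ h.1, h.2⟩

-- two folds agree when each list's admissible elements are dominated by the other's
lemma pvFoldl_dom (M : Int) (L L' : List Int) (b : Int)
    (h1 : ∀ s ∈ L, s ≤ M → ∃ s' ∈ L', s ≤ s' ∧ s' ≤ M)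
    (h2 : ∀ s ∈ L', s ≤ M → ∃ s' ∈ L, s ≤ s' ∧ s' ≤ M) :
    L.foldl (pvF M) b = L'.foldl (pvF M) b := by
  have key : ∀ (X Y : List Int), (∀ s ∈ X, s ≤ M → ∃ s' ∈ Y, s ≤ s' ∧ s' ≤ M) →
      X.foldl (pvF M) b ≤ Y.foldl (pvF M) b := by
    intro X Y h
    rcases pvFoldl_mem M X b with hx | hx
    · rw [hx]; exact pvLe_foldl M Y b
    · obtain ⟨s', hs', hle, hsm⟩ := h _ hx.1 hx.2
      exact le_trans hle (pvMem_le_foldl M Y b s' hs' hsm)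
  exact le_antisymm (key L L' h1) (key L' L h2)

lemma pvFoldl_flat {α : Type} (M : Int) (L : List α) (g : α → List Int) (b : Int) :
    L.foldl (fun acc x => (g x).foldl (pvF M) acc) b = (L.flatMap g).foldl (pvF M) b := by
  induction L generalizing b with
  | nil => rfl
  | cons x L ih => simp [List.foldl_append, ih]

-- the candidate sums the two-pointer window [lo,hi] still covers
def pvW (ai : Int) (arr : List Int) (lo hi : Nat) : List Int :=
  (List.range' lo (hi - lo)).flatMap (fun p =>
    (List.range' (p + 1) (hi - p)).map (fun q => ai + (arr.getD p 0 + arr.getD q 0)))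

lemma pvMem_W (ai : Int) (arr : List Int) (lo hi : Nat) (s : Int) :
    s ∈ pvW ai arr lo hi ↔
      ∃ p q : Nat, lo ≤ p ∧ p < q ∧ q ≤ hi ∧ s = ai + (arr.getD p 0 + arr.getD q 0) := by
  unfold pvW
  simp only [List.mem_flatMap, List.mem_map, List.mem_range'_1]
  constructor
  · rintro ⟨p, ⟨hp1, hp2⟩, q, ⟨hq1, hq2⟩, rfl⟩
    exact ⟨p, q, by omega, by omega, by omega, rfl⟩
  · rintro ⟨p, q, h1, h2, h3, rfl⟩
    exact ⟨p, ⟨by omega, by omega⟩, q, ⟨by omega, by omega⟩, rfl⟩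

lemma pvTwoPtr_eq (M ai t : Int) (arr : List Int) (ht : t = M - ai)
    (hs : ∀ p q : Nat, p ≤ q → q < arr.length → arr.getD p 0 ≤ arr.getD q 0) :
    ∀ (fuel lo hi : Nat), hi - lo ≤ fuel → hi < arr.length → ∀ best,
      pvTwoPtr arr ai t fuel lo hi best = (pvW ai arr lo hi).foldl (pvF M) best := by
  intro fuel
  induction fuel with
  | zero =>
    intro lo hi hle hhi best
    have h0 : hi - lo = 0 := by omega
    simp [pvTwoPtr, pvW, h0]
  | succ fuel ih =>
    intro lo hi hle hhi best
    by_cases hlt : lo < hi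
    · have hlo : lo < arr.length := by omega
      by_cases hcond : arr.getD lo 0 + arr.getD hi 0 ≤ t
      · have hstep : pvTwoPtr arr ai t (fuel + 1) lo hi best =
            pvTwoPtr arr ai t fuel (lo + 1) hi
              (if ai + (arr.getD lo 0 + arr.getD hi 0) > best
               then ai + (arr.getD lo 0 + arr.getD hi 0) else best) := by
          simp only [pvTwoPtr]
          rw [if_pos hlt, if_pos hcond]
        have hu0 : ai + (arr.getD lo 0 + arr.getD hi 0) ≤ M := by omega
        have hupd : (if ai + (arr.getD lo 0 + arr.getD hi 0) > best
             then ai + (arr.getD lo 0 + arr.getD hi 0) else best)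
            = pvF M best (ai + (arr.getD lo 0 + arr.getD hi 0)) := by
          unfold pvF; split_ifs <;> omega
        rw [hstep, hupd, ih (lo + 1) hi (by omega) hhi]
        have hcons : (pvW ai arr (lo + 1) hi).foldl (pvF M)
              (pvF M best (ai + (arr.getD lo 0 + arr.getD hi 0)))
            = ((ai + (arr.getD lo 0 + arr.getD hi 0)) :: pvW ai arr (lo + 1) hi).foldl (pvF M) best := rfl
        rw [hcons]
        apply pvFoldl_dom
        · -- every admissible candidate of the stepped list is in the full window
          intro s hsmem hsM
          refine ⟨s, ?_, le_refl s, hsM⟩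
          rcases List.mem_cons.1 hsmem with rfl | hsmem
          · exact (pvMem_W _ _ _ _ _).2 ⟨lo, hi, le_refl lo, hlt, le_refl hi, rfl⟩
          · obtain ⟨p, q, h1, h2, h3, rfl⟩ := (pvMem_W _ _ _ _ _).1 hsmem
            exact (pvMem_W _ _ _ _ _).2 ⟨p, q, by omega, h2, h3, rfl⟩
        · -- every admissible candidate of the full window is dominated by the stepped list
          intro s hsmem hsM
          obtain ⟨p, q, h1, h2, h3, rfl⟩ := (pvMem_W _ _ _ _ _).1 hsmem
          by_cases hp : p = lo
          · refine ⟨ai + (arr.getD lo 0 + arr.getD hi 0), List.mem_cons_self .., ?_, hu0⟩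
            have h4 := hs q hi h3 hhi
            rw [hp]
            omega
          · exact ⟨_, List.mem_cons_of_mem _
              ((pvMem_W _ _ _ _ _).2 ⟨p, q, by omega, h2, h3, rfl⟩), le_refl _, hsM⟩
      · have hstep : pvTwoPtr arr ai t (fuel + 1) lo hi best =
            pvTwoPtr arr ai t fuel lo (hi - 1) best := by
          simp only [pvTwoPtr]
          rw [if_pos hlt, if_neg hcond]
        rw [hstep, ih lo (hi - 1) (by omega) (by omega)]
        apply pvFoldl_dom
        · intro s hsmem hsM
          obtain ⟨p, q, h1, h2, h3, rfl⟩ := (pvMem_W _ _ _ _ _).1 hsmem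
          exact ⟨_, (pvMem_W _ _ _ _ _).2 ⟨p, q, h1, h2, by omega, rfl⟩, le_refl _, hsM⟩
        · intro s hsmem hsM
          obtain ⟨p, q, h1, h2, h3, rfl⟩ := (pvMem_W _ _ _ _ _).1 hsmem
          by_cases hq : q = hi
          · subst hq
            have hplo := hs lo p h1 (by omega)
            omega
          · exact ⟨_, (pvMem_W _ _ _ _ _).2 ⟨p, q, h1, h2, by omega, rfl⟩, le_refl _, hsM⟩
    · have h0 : hi - lo = 0 := by omega
      simp [pvTwoPtr, hlt, pvW, h0]

-- sums over all index triples of the first-N prefix, as A enumerates them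
def pvLA (N : Int) (cards : List Int) : List Int :=
  (PySem.List.pyRange 0 (N - 2) 1).flatMap (fun i =>
    (PySem.List.pyRange (i + 1) (N - 1) 1).flatMap (fun j =>
      (PySem.List.pyRange (j + 1) N 1).map (fun k =>
        PySem.List.pyGetD cards i 0 + PySem.List.pyGetD cards j 0 + PySem.List.pyGetD cards k 0)))

lemma pvFoldl_map' {α : Type} (M : Int) (L : List α) (e : α → Int) (b : Int) :
    L.foldl (fun acc x => if e x ≤ M ∧ e x > acc then e x else acc) b = (L.map e).foldl (pvF M) b := by
  rw [List.foldl_map]; rfl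

lemma pvA_norm (N M : Int) (cards : List Int) :
    find_close_sum N M cards = (pvLA N cards).foldl (pvF M) 0 := by
  unfold find_close_sum pvLA
  simp only [pvFoldl_map', pvFoldl_flat]

lemma pvB_norm (N M : Int) (cards : List Int) :
    find_close_sum_alt N M cards =
      (let arr := PySem.List.sorted ((PySem.List.pyRange 0 N 1).map (fun k => PySem.List.pyGetD cards k 0)) (fun x => x) false
       ((List.range (arr.length - 2)).flatMap (fun i =>
         pvW (arr.getD i 0) arr (i + 1) (arr.length - 1))).foldl (pvF M) 0) := by
  unfold find_close_sum_alt
  set arr := PySem.List.sorted ((PySem.List.pyRange 0 N 1).map (fun k => PySem.List.pyGetD cards k 0)) (fun x => x) false with harr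
  have hs : ∀ p q : Nat, p ≤ q → q < arr.length → arr.getD p 0 ≤ arr.getD q 0 := by
    intro p q hpq hq
    rw [List.getD_eq_getElem arr 0 (lt_of_le_of_lt hpq hq), List.getD_eq_getElem arr 0 hq]
    exact PySem.List.sorted_id_getElem_mono _ hpq hq
  rw [← pvFoldl_flat]
  apply PySem.List.foldl_congr_mem
  intro acc i hi
  have hlen : i < arr.length - 2 := List.mem_range.1 hi
  exact pvTwoPtr_eq M (arr.getD i 0) (M - arr.getD i 0) arr rfl hs _ _ _ (by omega) (by omega) acc

-- triple sums chosen from a list, structurally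
def pvPairs : List Int → List Int
  | [] => []
  | x :: xs => xs.map (fun y => x + y) ++ pvPairs xs

def pvTriples : List Int → List Int
  | [] => []
  | x :: xs => (pvPairs xs).map (fun y => x + y) ++ pvTriples xs

lemma pvMem_pairs (l : List Int) (s : Int) :
    s ∈ pvPairs l ↔ ∃ j k : Nat, j < k ∧ k < l.length ∧ s = l.getD j 0 + l.getD k 0 := by
  induction l with
  | nil => simp [pvPairs]
  | cons x xs ih =>
    simp only [pvPairs, List.mem_append, List.mem_map, ih]
    constructor
    · rintro (⟨y, hy, rfl⟩ | ⟨j, k, h1, h2, rfl⟩)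
      · obtain ⟨k, hk, rfl⟩ := List.mem_iff_getElem.1 hy
        exact ⟨0, k + 1, by omega, by simp; omega,
          by rw [List.getD_cons_zero, List.getD_cons_succ, List.getD_eq_getElem xs 0 hk]⟩
      · exact ⟨j + 1, k + 1, by omega, by simp; omega, by simp⟩
    · rintro ⟨j, k, h1, h2, rfl⟩
      match j, k with
      | 0, k + 1 =>
        left
        have hk : k < xs.length := by simp at h2; omega
        exact ⟨xs.getD k 0, by rw [List.getD_eq_getElem xs 0 hk]; exact List.getElem_mem hk, by simp⟩
      | j + 1, k + 1 =>
        right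
        exact ⟨j, k, by omega, by simp at h2; omega, by simp⟩

lemma pvMem_triples (l : List Int) (s : Int) :
    s ∈ pvTriples l ↔ ∃ i j k : Nat, i < j ∧ j < k ∧ k < l.length ∧
      s = l.getD i 0 + (l.getD j 0 + l.getD k 0) := by
  induction l with
  | nil => simp [pvTriples]
  | cons x xs ih =>
    simp only [pvTriples, List.mem_append, List.mem_map, ih, pvMem_pairs]
    constructor
    · rintro (⟨y, ⟨j, k, h1, h2, rfl⟩, rfl⟩ | ⟨i, j, k, h1, h2, h3, rfl⟩)
      · exact ⟨0, j + 1, k + 1, by omega, by omega, by simp; omega, by simp⟩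
      · exact ⟨i + 1, j + 1, k + 1, by omega, by omega, by simp; omega, by simp⟩
    · rintro ⟨i, j, k, h1, h2, h3, rfl⟩
      match i, j, k with
      | 0, j + 1, k + 1 =>
        left
        exact ⟨xs.getD j 0 + xs.getD k 0, ⟨j, k, by omega, by simp at h3; omega, rfl⟩, by simp⟩
      | i + 1, j + 1, k + 1 =>
        right
        exact ⟨i, j, k, by omega, by omega, by simp at h3; omega, by simp⟩

lemma pvPairs_perm {l l' : List Int} (h : l.Perm l') : (pvPairs l).Perm (pvPairs l') := by
  induction h with
  | nil => rfl
  | cons x h ih => exact List.Perm.append (h.map _) ih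
  | swap x y l =>
    simp only [pvPairs, List.map_cons, List.cons_append]
    rw [add_comm y x]
    refine List.Perm.cons _ ?_
    rw [← List.append_assoc, ← List.append_assoc]
    exact List.Perm.append_right _ List.perm_append_comm
  | trans _ _ ih1 ih2 => exact ih1.trans ih2

lemma pvTriples_perm {l l' : List Int} (h : l.Perm l') : (pvTriples l).Perm (pvTriples l') := by
  induction h with
  | nil => rfl
  | cons x h ih => exact List.Perm.append ((pvPairs_perm h).map _) ih
  | swap x y l =>
    have hf : (fun z : Int => y + (x + z)) = (fun z : Int => x + (y + z)) := by
      funext z; ring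
    simp only [pvTriples, pvPairs, List.map_append, List.map_map, List.append_assoc,
      Function.comp_def, hf]
    exact List.Perm.append_left _ (List.perm_append_comm_assoc _ _ _)
  | trans _ _ ih1 ih2 => exact ih1.trans ih2

lemma pvGet_take (cards : List Int) (N i : Int) (h0 : 0 ≤ i) (hi : i < N)
    (hle : N ≤ (cards.length : Int)) :
    PySem.List.pyGetD cards i 0 = (cards.take N.toNat).getD i.toNat 0 := by
  rw [PySem.List.pyGetD_eq_getElem cards 0 h0 (by omega),
    List.getD_eq_getElem _ _ (by rw [List.length_take]; omega)]
  exact (List.getElem_take).symm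

-- Source B's materialised prefix [cards[k] for k in range(N)] is the take-prefix
lemma pvMapRange_take (cards : List Int) (N : Int) (h0 : 0 ≤ N)
    (hle : N ≤ (cards.length : Int)) :
    (PySem.List.pyRange 0 N 1).map (fun k => PySem.List.pyGetD cards k 0) =
      cards.take N.toNat := by
  apply List.ext_getElem
  · rw [List.length_map, PySem.List.length_pyRange_one, List.length_take]
    omega
  · intro k hk1 hk2
    rw [List.getElem_map, PySem.List.getElem_pyRange_one, List.getElem_take]
    rw [List.length_map, PySem.List.length_pyRange_one] at hk1
    rw [PySem.List.pyGetD_eq_getElem cards 0 (by omega) (by omega)]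
    congr 1
    omega

lemma pvMem_LA (N : Int) (cards : List Int) (hN0 : 0 ≤ N) (hle : N ≤ (cards.length : Int))
    (s : Int) : s ∈ pvLA N cards ↔ s ∈ pvTriples (cards.take N.toNat) := by
  rw [pvMem_triples]
  unfold pvLA
  simp only [List.mem_flatMap, List.mem_map, PySem.List.mem_pyRange_one]
  have hlen : (cards.take N.toNat).length = N.toNat := by rw [List.length_take]; omega
  constructor
  · rintro ⟨i, ⟨hi0, hi2⟩, j, ⟨hj1, hj2⟩, k, ⟨hk1, hk2⟩, rfl⟩
    refine ⟨i.toNat, j.toNat, k.toNat, by omega, by omega, by omega, ?_⟩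
    rw [pvGet_take cards N i (by omega) (by omega) hle,
      pvGet_take cards N j (by omega) (by omega) hle,
      pvGet_take cards N k (by omega) (by omega) hle]
    ring
  · rintro ⟨i, j, k, h1, h2, h3, rfl⟩
    refine ⟨(i : Int), ⟨by omega, by omega⟩, (j : Int), ⟨by omega, by omega⟩,
      (k : Int), ⟨by omega, by omega⟩, ?_⟩
    rw [pvGet_take cards N (i : Int) (by omega) (by omega) hle,
      pvGet_take cards N (j : Int) (by omega) (by omega) hle,
      pvGet_take cards N (k : Int) (by omega) (by omega) hle]
    simp only [Int.toNat_natCast]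
    ring

lemma pvMem_LB (arr : List Int) (s : Int) :
    s ∈ (List.range (arr.length - 2)).flatMap
        (fun i => pvW (arr.getD i 0) arr (i + 1) (arr.length - 1)) ↔ s ∈ pvTriples arr := by
  rw [pvMem_triples]
  simp only [List.mem_flatMap, List.mem_range, pvMem_W]
  constructor
  · rintro ⟨i, hi, p, q, h1, h2, h3, rfl⟩
    exact ⟨i, p, q, by omega, h2, by omega, rfl⟩
  · rintro ⟨i, j, k, h1, h2, h3, rfl⟩
    exact ⟨i, by omega, j, k, by omega, h2, by omega, rfl⟩

-- ===== VERDICT (by name: the statement is the Claim_ definition above) =====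
theorem find_close_sum_spec : Claim_equal_find_close_sum := by
  intro N M cards hdom hpre
  unfold Spec_find_close_sum
  rw [pvA_norm, pvB_norm]
  dsimp only
  set arr := PySem.List.sorted ((PySem.List.pyRange 0 N 1).map (fun k => PySem.List.pyGetD cards k 0)) (fun x => x) false with harr
  have hlenarr : arr.length = N.toNat := by
    rw [harr, PySem.List.length_sorted, List.length_map, PySem.List.length_pyRange_one]
    omega
  by_cases h3 : N < 3
  · have hA : pvLA N cards = [] := by
      unfold pvLA
      rw [PySem.List.pyRange_one_eq_nil (by omega)]
      rfl
    have hlen2 : arr.length - 2 = 0 := by omega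
    rw [hA, hlen2]
    rfl
  · have hN0 : (0 : Int) ≤ N := by omega
    have hle : N ≤ (cards.length : Int) := by
      rcases hpre with h | h
      · exact h
      · omega
    have hperm : arr.Perm (cards.take N.toNat) := by
      rw [harr, pvMapRange_take cards N hN0 hle]
      exact PySem.List.sorted_perm _ _ _
    have hiff : ∀ s : Int, s ∈ pvLA N cards ↔
        s ∈ (List.range (arr.length - 2)).flatMap
          (fun i => pvW (arr.getD i 0) arr (i + 1) (arr.length - 1)) := by
      intro s
      rw [pvMem_LA N cards hN0 hle s, pvMem_LB arr s,
        List.Perm.mem_iff (pvTriples_perm hperm)]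
    apply pvFoldl_dom
    · intro s hsmem hsM
      exact ⟨s, (hiff s).1 hsmem, le_refl s, hsM⟩
    · intro s hsmem hsM
      exact ⟨s, (hiff s).2 hsmem, le_refl s, hsM⟩
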